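-- pv_equiv track=rewrite | github.com/HominidHazard/Dungeon_Designer | Dungeon_Designer/Dungeon_Designer/MapGenerator.py | convert_to_tiles
-- ===== SOURCE A (Python) =====
-- def convert_to_tiles(gridsize, Startpath, booty, monsters, path, RoomLoc):
--     """compile all coordinates into one list
--
--     At this point the program has been creating a bunch of different lists of
--     coordinates.
--     For instance our path will look like [12, 13, 14, 24, 34, 35, 36]
--     We need to combine all of these into one list that represents the entire
--     board."""
--
--     board = []
--     var = 0
--     room_tile = 'R'
--     pTile = 'P'
--     edgeTile = 'O'
--     bootyTile = 'B'
--     monsterTile = 'M'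
--     #doortile = 'D' this is currently not used
--     grass = 'G' #if you're not a part of any list you're a grass
--
--     for row in range(gridsize):
--     # Appen a blank list to each row cell
--         board.append([])
--         for column in range(gridsize):
--             var = (var + 1)
--             if var in Startpath:
--                 board[row].append(edgeTile)
--             elif var in booty:
--                 board[row].append(bootyTile)
--             elif var in monsters:
--                 board[row].append(monsterTile)
--             elif var in path:
--                 board[row].append(pTile)
--             elif var in RoomLoc:
--                 board[row].append(room_tile)
--             else:
--                 board[row].append(grass)
--
--     return board #this is the representation of our map in text
-- ===== SOURCE B (Python) =====
-- def convert_to_tiles(gridsize, Startpath, booty, monsters, path, RoomLoc):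
--     # Scatter-paint: start from an all-grass flat canvas of gridsize*gridsize
--     # cells, paint each coordinate list onto it in reverse priority order
--     # (later paints overwrite earlier ones), then cut the canvas into rows.
--     n2 = max(gridsize, 0) ** 2   # no rows exist for gridsize <= 0
--     flat = ['G'] * n2
--     for coords, tile in ((RoomLoc, 'R'), (path, 'P'), (monsters, 'M'),
--                          (booty, 'B'), (Startpath, 'O')):
--         for v in coords:
--             if 1 <= v <= n2:
--                 flat[v - 1] = tile
--     return [flat[r * gridsize:(r + 1) * gridsize] for r in range(gridsize)]
-- ===== Notes on version B (the rewrite author's own statement) =====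
-- stated objective: faster
-- what changed: Replaces the per-cell five-way membership elif scan with scatter-painting: an all-grass flat canvas is built once, each coordinate list is painted onto it in reverse priority order so later paints overwrite, and the canvas is then sliced into rows.
import Mathlib
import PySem

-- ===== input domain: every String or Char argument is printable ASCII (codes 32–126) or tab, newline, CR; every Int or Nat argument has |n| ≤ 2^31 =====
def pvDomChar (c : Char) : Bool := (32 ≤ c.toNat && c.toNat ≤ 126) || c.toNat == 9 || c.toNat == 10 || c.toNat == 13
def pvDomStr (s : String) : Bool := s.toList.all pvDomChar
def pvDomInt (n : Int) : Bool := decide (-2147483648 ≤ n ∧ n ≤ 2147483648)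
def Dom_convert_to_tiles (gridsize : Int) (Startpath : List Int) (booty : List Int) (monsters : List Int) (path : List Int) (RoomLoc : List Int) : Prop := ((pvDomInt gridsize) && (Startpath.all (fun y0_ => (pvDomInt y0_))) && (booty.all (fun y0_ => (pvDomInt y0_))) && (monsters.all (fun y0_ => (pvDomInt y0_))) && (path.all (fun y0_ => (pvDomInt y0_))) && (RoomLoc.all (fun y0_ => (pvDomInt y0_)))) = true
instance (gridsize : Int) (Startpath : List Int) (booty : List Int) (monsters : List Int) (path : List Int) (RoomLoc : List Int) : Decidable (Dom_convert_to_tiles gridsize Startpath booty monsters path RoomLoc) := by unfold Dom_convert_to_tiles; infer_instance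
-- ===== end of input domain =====

-- B replaces A's per-cell five-way elif membership scan with scatter-painting:
-- an all-grass flat canvas, painted by each coordinate list in reverse
-- priority order (later paints overwrite), then sliced into rows.

-- ===== PORT A =====
-- board[row].append(t): row is always the index of the just-appended (last) row,
-- so it is rendered as modify at index length-1.
def convert_to_tiles (gridsize : Int) (Startpath : List Int) (booty : List Int) (monsters : List Int) (path : List Int) (RoomLoc : List Int) : List (List String) :=
  let st :=
    (PySem.List.pyRange 0 gridsize 1).foldl
      (fun (st : List (List String) × Int) _row =>
        let board := st.1 ++ [([] : List String)]
        (PySem.List.pyRange 0 gridsize 1).foldl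
          (fun (st2 : List (List String) × Int) _column =>
            let var := st2.2 + 1
            let tile :=
              if var ∈ Startpath then "O"
              else if var ∈ booty then "B"
              else if var ∈ monsters then "M"
              else if var ∈ path then "P"
              else if var ∈ RoomLoc then "R"
              else "G"
            (st2.1.modify (st2.1.length - 1) (fun r => r ++ [tile]), var))
          (board, st.2))
      ([], 0)
  st.1

-- ===== PORT B =====
-- flat[v-1] = tile → List.set (exact: the guard 1 <= v <= n2 keeps the index in range);
-- flat[r*g:(r+1)*g] → PySem.List.slice.
def convert_to_tiles_alt (gridsize : Int) (Startpath : List Int) (booty : List Int) (monsters : List Int) (path : List Int) (RoomLoc : List Int) : List (List String) :=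
  let n2 := max gridsize 0 * max gridsize 0   -- max(gridsize, 0) ** 2
  let flat :=
    ([(RoomLoc, "R"), (path, "P"), (monsters, "M"), (booty, "B"), (Startpath, "O")]).foldl
      (fun f (p : List Int × String) =>
        p.1.foldl (fun f v =>
          if 1 ≤ v ∧ v ≤ n2 then f.set (v - 1).toNat p.2 else f) f)
      (List.replicate n2.toNat "G")
  (PySem.List.pyRange 0 gridsize 1).map (fun r =>
    PySem.List.slice flat (some (r * gridsize)) (some ((r + 1) * gridsize)))

-- ===== PRECONDITION & SPEC =====
def Spec_convert_to_tiles (gridsize : Int) (Startpath : List Int) (booty : List Int) (monsters : List Int) (path : List Int) (RoomLoc : List Int) (out : List (List String)) : Prop := out = convert_to_tiles_alt gridsize Startpath booty monsters path RoomLoc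
instance (gridsize : Int) (Startpath : List Int) (booty : List Int) (monsters : List Int) (path : List Int) (RoomLoc : List Int) (out : List (List String)) : Decidable (Spec_convert_to_tiles gridsize Startpath booty monsters path RoomLoc out) := by unfold Spec_convert_to_tiles; infer_instance

-- ===== CLAIM (what is proved, stated in full; the proofs are below) =====
def Claim_equal_convert_to_tiles : Prop := ∀ (gridsize : Int) (Startpath : List Int) (booty : List Int) (monsters : List Int) (path : List Int) (RoomLoc : List Int), Dom_convert_to_tiles gridsize Startpath booty monsters path RoomLoc → Spec_convert_to_tiles gridsize Startpath booty monsters path RoomLoc (convert_to_tiles gridsize Startpath booty monsters path RoomLoc)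

-- ===== LEMMAS AND PROOFS =====

-- the priority chain as a function: the value both programs put in cell var
def ctTile (Sp bo mo pa Rl : List Int) (var : Int) : String :=
  if var ∈ Sp then "O"
  else if var ∈ bo then "B"
  else if var ∈ mo then "M"
  else if var ∈ pa then "P"
  else if var ∈ Rl then "R"
  else "G"

def intRange (n : Nat) : List Int := (List.range n).map (Nat.cast : Nat → Int)

theorem intRange_succ (n : Nat) : intRange (n + 1) = intRange n ++ [(n : Int)] := by
  simp [intRange, List.range_succ]

theorem intRange_length (n : Nat) : (intRange n).length = n := by simp [intRange]

theorem intRange_getElem? (n i : Nat) :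
    (intRange n)[i]? = if i < n then some ((i : Nat) : Int) else none := by
  by_cases h : i < n <;> simp [intRange, h]

theorem intRange_succ_left (n : Nat) : intRange (n + 1) = 0 :: (intRange n).map (· + 1) := by
  simp only [intRange, List.range_succ_eq_map, List.map_cons, List.map_map, Nat.cast_zero]
  congr 1

theorem map_shift (T : Int → String) (n : Nat) (v : Int) :
    T (v + 1) :: (intRange n).map (fun i => T (v + 1 + i + 1))
      = (intRange (n + 1)).map (fun i => T (v + i + 1)) := by
  rw [intRange_succ_left]
  simp only [List.map_cons, List.map_map]
  congr 1
  · norm_num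
  · apply List.map_congr_left
    intro i _
    simp only [Function.comp_apply]
    congr 1
    ring

-- A's inner loop appends one full row-worth of tiles to the last row
theorem innerA (Sp bo mo pa Rl : List Int) (cols : List Int) (b : List (List String)) (r : List String) (var : Int) :
    cols.foldl
      (fun (st2 : List (List String) × Int) _column =>
        (st2.1.modify (st2.1.length - 1)
          (fun r => r ++
            [if st2.2 + 1 ∈ Sp then "O"
             else if st2.2 + 1 ∈ bo then "B"
             else if st2.2 + 1 ∈ mo then "M"
             else if st2.2 + 1 ∈ pa then "P"
             else if st2.2 + 1 ∈ Rl then "R"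
             else "G"]), st2.2 + 1))
      (b ++ [r], var)
      = (b ++ [r ++ (intRange cols.length).map (fun i => ctTile Sp bo mo pa Rl (var + i + 1))],
         var + (cols.length : Int)) := by
  induction cols generalizing r var with
  | nil => simp [intRange]
  | cons c t ih =>
      simp only [List.foldl_cons]
      have hmod : (b ++ [r]).modify ((b ++ [r]).length - 1)
          (fun r => r ++
            [if var + 1 ∈ Sp then "O" else if var + 1 ∈ bo then "B"
             else if var + 1 ∈ mo then "M" else if var + 1 ∈ pa then "P"
             else if var + 1 ∈ Rl then "R" else "G"])
          = b ++ [r ++ [ctTile Sp bo mo pa Rl (var + 1)]] := by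
        rw [show (b ++ [r]).length - 1 = b.length by simp]
        rw [List.modify_eq_set_getElem?]
        simp [ctTile, List.set_append_right]
      rw [hmod, ih]
      simp only [List.length_cons, Prod.mk.injEq]
      constructor
      · rw [← map_shift (ctTile Sp bo mo pa Rl) t.length var]
        simp
      · push_cast; ring

-- A's outer loop: the whole board in map form
theorem outerA (Sp bo mo pa Rl : List Int) (n : Nat) (cols : List Int) :
    ((intRange n).foldl
      (fun (st : List (List String) × Int) _row =>
        cols.foldl
          (fun (st2 : List (List String) × Int) _column =>
            (st2.1.modify (st2.1.length - 1)
              (fun r => r ++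
                [if st2.2 + 1 ∈ Sp then "O"
                 else if st2.2 + 1 ∈ bo then "B"
                 else if st2.2 + 1 ∈ mo then "M"
                 else if st2.2 + 1 ∈ pa then "P"
                 else if st2.2 + 1 ∈ Rl then "R"
                 else "G"]), st2.2 + 1))
          (st.1 ++ [([] : List String)], st.2))
      ([], 0))
      = ((intRange n).map (fun rw =>
          (intRange cols.length).map (fun i =>
            ctTile Sp bo mo pa Rl (rw * (cols.length : Int) + i + 1))),
         (n : Int) * (cols.length : Int)) := by
  induction n with
  | zero => simp [intRange]
  | succ m ih =>
      rw [intRange_succ, List.foldl_append, ih, List.foldl_cons, List.foldl_nil]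
      rw [innerA]
      simp only [List.map_append, List.map_cons, List.map_nil, Prod.mk.injEq]
      constructor
      · congr 1
      · push_cast; ring

-- painting one list preserves the canvas length
theorem paint_length (l : List Int) (c : String) (n2 : Int) (f : List String) :
    (l.foldl (fun f v => if 1 ≤ v ∧ v ≤ n2 then f.set (v - 1).toNat c else f) f).length
      = f.length := by
  induction l generalizing f with
  | nil => rfl
  | cons v t ih =>
      simp only [List.foldl_cons]
      rw [ih]
      split_ifs <;> simp

-- what one painting pass leaves at index i
theorem paint_getElem? (l : List Int) (c : String) (n2 : Int) (f : List String) (i : Nat)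
    (hlen : (f.length : Int) ≤ n2) :
    (l.foldl (fun f v => if 1 ≤ v ∧ v ≤ n2 then f.set (v - 1).toNat c else f) f)[i]?
      = if ((i : Int) + 1) ∈ l ∧ i < f.length then some c else f[i]? := by
  induction l generalizing f with
  | nil => simp
  | cons v t ih =>
      simp only [List.foldl_cons]
      have hstep : (if 1 ≤ v ∧ v ≤ n2 then f.set (v - 1).toNat c else f).length = f.length := by
        split_ifs <;> simp
      have hset : (if 1 ≤ v ∧ v ≤ n2 then f.set (v - 1).toNat c else f)[i]?
          = if ((i : Int) + 1 = v ∧ i < f.length) then some c else f[i]? := by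
        split_ifs with hg hv hv
        · rw [List.getElem?_set]
          have h1 : (v - 1).toNat = i := by omega
          simp [h1, hv.2]
        · rw [List.getElem?_set]
          split_ifs with h1 h2
          · exact absurd ⟨by omega, by omega⟩ hv
          · rw [List.getElem?_eq_none]
            omega
          · rfl
        · exact absurd ⟨by omega, by omega⟩ hg
        · rfl
      rw [ih _ (by rw [hstep]; exact hlen), hstep, hset]
      simp only [List.mem_cons]
      split_ifs <;> tauto

-- the fully painted canvas realises the priority chain at every in-range cell
theorem flat_getElem? (Sp bo mo pa Rl : List Int) (n2 : Int) (i : Nat)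
    (hi : i < n2.toNat) :
    (([(Rl, "R"), (pa, "P"), (mo, "M"), (bo, "B"), (Sp, "O")]).foldl
      (fun f (p : List Int × String) =>
        p.1.foldl (fun f v =>
          if 1 ≤ v ∧ v ≤ n2 then f.set (v - 1).toNat p.2 else f) f)
      (List.replicate n2.toNat "G"))[i]?
      = some (ctTile Sp bo mo pa Rl ((i : Int) + 1)) := by
  have h0 : (List.replicate n2.toNat "G").length = n2.toNat := by simp
  have hb : ((n2.toNat : Nat) : Int) ≤ n2 := by omega
  simp only [List.foldl_cons, List.foldl_nil]
  rw [paint_getElem? _ _ _ _ _ (by rw [paint_length, paint_length, paint_length, paint_length, h0]; exact hb)]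
  rw [paint_getElem? _ _ _ _ _ (by rw [paint_length, paint_length, paint_length, h0]; exact hb)]
  rw [paint_getElem? _ _ _ _ _ (by rw [paint_length, paint_length, h0]; exact hb)]
  rw [paint_getElem? _ _ _ _ _ (by rw [paint_length, h0]; exact hb)]
  rw [paint_getElem? _ _ _ _ _ (by rw [h0]; exact hb)]
  simp only [paint_length, h0, hi, and_true]
  have hrep : (List.replicate n2.toNat "G")[i]? = some "G" := by
    simp [hi]
  unfold ctTile
  by_cases h1 : ((i:Int)+1) ∈ Sp <;> by_cases h2 : ((i:Int)+1) ∈ bo <;>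
    by_cases h3 : ((i:Int)+1) ∈ mo <;> by_cases h4 : ((i:Int)+1) ∈ pa <;>
    by_cases h5 : ((i:Int)+1) ∈ Rl <;>
    simp [h1, h2, h3, h4, h5, hrep]

-- pyRange(0, g) in Nat-range form, for every g
theorem pyRange_zero_eq (g : Int) :
    PySem.List.pyRange 0 g 1 = intRange g.toNat := by
  by_cases hg : g ≤ 0
  · rw [show g.toNat = 0 by omega]
    simp only [intRange, List.range_zero, List.map_nil]
    simp [PySem.List.pyRange]
    omega
  · have h2 : ((g.toNat : Nat) : Int) = g := by omega
    rw [← h2, PySem.List.pyRange_zero_natCast]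
    rw [show ((((g.toNat : Nat) : Int)).toNat) = g.toNat by omega]
    rfl

-- slicing row r out of the painted canvas gives A's row
theorem slice_row (Sp bo mo pa Rl : List Int) (g : Int) (r : Int)
    (hr : 0 ≤ r) (hrg : r < g) :
    PySem.List.slice
      (([(Rl, "R"), (pa, "P"), (mo, "M"), (bo, "B"), (Sp, "O")]).foldl
        (fun f (p : List Int × String) =>
          p.1.foldl (fun f v =>
            if 1 ≤ v ∧ v ≤ g * g then f.set (v - 1).toNat p.2 else f) f)
        (List.replicate (g * g).toNat "G"))
      (some (r * g)) (some ((r + 1) * g))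
      = (intRange g.toNat).map (fun i => ctTile Sp bo mo pa Rl (r * g + i + 1)) := by
  have hg : 0 < g := lt_of_le_of_lt hr hrg
  set flat := (([(Rl, "R"), (pa, "P"), (mo, "M"), (bo, "B"), (Sp, "O")]).foldl
        (fun f (p : List Int × String) =>
          p.1.foldl (fun f v =>
            if 1 ≤ v ∧ v ≤ g * g then f.set (v - 1).toNat p.2 else f) f)
        (List.replicate (g * g).toNat "G")) with hflat
  have hfl : flat.length = (g * g).toNat := by
    rw [hflat]
    simp only [List.foldl_cons, List.foldl_nil]
    rw [paint_length, paint_length, paint_length, paint_length, paint_length]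
    simp
  have ha : (0:Int) ≤ r * g := mul_nonneg hr (le_of_lt hg)
  have hb : (0:Int) ≤ (r + 1) * g := mul_nonneg (by omega) (le_of_lt hg)
  rw [PySem.List.slice_toNat _ ha hb]
  have hcnt : ((r + 1) * g).toNat - (r * g).toNat = g.toNat := by
    have : (r + 1) * g = r * g + g := by ring
    omega
  rw [hcnt]
  apply List.ext_getElem?
  intro c
  rw [List.getElem?_take, List.getElem?_drop, List.getElem?_map, intRange_getElem?]
  by_cases hc : c < g.toNat
  · simp only [hc, if_true, Option.map_some]
    have hidx : (r * g).toNat + c < (g * g).toNat := by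
      have h1 : r * g + (c : Int) < g * g := by
        have : r * g + (c : Int) < r * g + g := by omega
        have h2 : r * g + g ≤ g * g := by nlinarith
        omega
      omega
    rw [hflat] at *
    rw [flat_getElem? Sp bo mo pa Rl (g*g) _ hidx,
        show (((r * g).toNat + c : Nat) : Int) = r * g + c from by push_cast; omega]
  · simp [hc]

-- ===== VERDICT (by name: the statement is the Claim_ definition above) =====
theorem convert_to_tiles_spec : Claim_equal_convert_to_tiles := by
  intro g Sp bo mo pa Rl _
  show convert_to_tiles g Sp bo mo pa Rl = convert_to_tiles_alt g Sp bo mo pa Rl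
  unfold convert_to_tiles convert_to_tiles_alt
  simp only [pyRange_zero_eq]
  rw [outerA Sp bo mo pa Rl g.toNat (intRange g.toNat)]
  simp only [intRange_length]
  apply List.map_congr_left
  intro r hr
  have hr' : 0 ≤ r ∧ r < g := by
    simp only [intRange, List.mem_map] at hr
    obtain ⟨k, hk, hke⟩ := hr
    rw [List.mem_range] at hk
    omega
  rw [show max g 0 = g from by omega,
      slice_row Sp bo mo pa Rl g r hr'.1 hr'.2,
      show ((g.toNat : Nat) : Int) = g from by omega]
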